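-- pv_equiv track=rewrite | github.com/MYousryElSadec/RetroMotifs | code/05_tile6_motif_pos_aligned.py | build_q2r_map
-- ===== SOURCE A (Python) =====
-- def build_q2r_map(ref_aln: str, qry_aln: str) -> tuple[list[int | None], int]:
--     """Return mapping from query ungapped index -> reference ungapped index (or None).
--     Also return the ungapped reference length.
--     """
--     q2r: list[int | None] = []
--     q_idx = r_idx = 0
--     for ra, qa in zip(ref_aln, qry_aln):
--         ref_gap = (ra == '-')
--         qry_gap = (qa == '-')
--         if not qry_gap:
--             if not ref_gap:
--                 q2r.append(r_idx)
--             else: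
--                 q2r.append(None)
--             q_idx += 1
--         if not ref_gap:
--             r_idx += 1
--     return q2r, r_idx
-- ===== SOURCE B (Python) =====
-- def build_q2r_map(ref_aln: str, qry_aln: str) -> tuple[list[int | None], int]:
--     """Return mapping from query ungapped index -> reference ungapped index (or None).
--     Also return the ungapped reference length.
--     """
--     cols = list(zip(ref_aln, qry_aln))
--     # Pass 1: prefix table of reference ungapped indices per zipped column.
--     ref_idx_at: list[int] = []
--     r = 0
--     for ra, _ in cols:
--         ref_idx_at.append(r)
--         if ra != '-':
--             r += 1
--     # Pass 2: keep query-consuming columns, mapping each to its ref index (or None).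
--     q2r = [ridx if ra != '-' else None
--            for (ra, qa), ridx in zip(cols, ref_idx_at) if qa != '-']
--     return q2r, r
-- ===== Notes on version B (the rewrite author's own statement) =====
-- stated objective: alternative
-- what changed: Replaces the single interleaved three-accumulator loop with a precomputed prefix table of reference ungapped indices followed by a separate filtered mapping pass over the zipped columns.
import Mathlib
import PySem

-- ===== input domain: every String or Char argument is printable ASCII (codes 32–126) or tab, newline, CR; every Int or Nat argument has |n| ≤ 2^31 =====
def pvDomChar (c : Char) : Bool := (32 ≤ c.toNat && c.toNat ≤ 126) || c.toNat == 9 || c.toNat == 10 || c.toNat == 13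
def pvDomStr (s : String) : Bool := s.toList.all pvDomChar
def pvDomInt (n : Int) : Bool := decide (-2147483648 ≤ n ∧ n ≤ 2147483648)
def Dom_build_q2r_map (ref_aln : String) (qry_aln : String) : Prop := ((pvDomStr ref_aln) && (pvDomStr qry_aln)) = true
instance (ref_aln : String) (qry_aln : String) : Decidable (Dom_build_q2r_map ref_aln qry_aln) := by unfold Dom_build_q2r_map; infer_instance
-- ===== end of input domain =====

-- B replaces A's single interleaved accumulator loop by a prefix table of reference
-- indices plus a separate filtered mapping pass (objective: alternative, same cost).

-- ===== PORT A =====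
-- state = (q2r, q_idx, r_idx), exactly A's loop body
def pvStepA (st : List (Option Int) × Int × Int) (c : Char × Char) : List (Option Int) × Int × Int :=
  let st1 := if c.2 ≠ '-' then
      (st.1 ++ [if c.1 ≠ '-' then some st.2.2 else none], st.2.1 + 1, st.2.2)
    else st
  if c.1 ≠ '-' then (st1.1, st1.2.1, st1.2.2 + 1) else st1

def build_q2r_map (ref_aln : String) (qry_aln : String) : List (Option Int) × Int :=
  let st := (ref_aln.toList.zip qry_aln.toList).foldl pvStepA ([], 0, 0)
  (st.1, st.2.2)

-- ===== PORT B =====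
-- pass 1 step: append current ref index, bump it on a non-gap reference char
def pvStepT (st : List Int × Int) (c : Char × Char) : List Int × Int :=
  (st.1 ++ [st.2], if c.1 ≠ '-' then st.2 + 1 else st.2)

-- pass 2 selector: keep query-consuming columns, map to ref index or none
def pvSel (p : (Char × Char) × Int) : Option (Option Int) :=
  if p.1.2 ≠ '-' then some (if p.1.1 ≠ '-' then some p.2 else none) else none

def build_q2r_map_alt (ref_aln : String) (qry_aln : String) : List (Option Int) × Int :=
  let cols := ref_aln.toList.zip qry_aln.toList
  let st := cols.foldl pvStepT ([], 0)
  ((cols.zip st.1).filterMap pvSel, st.2)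

-- ===== PRECONDITION & SPEC =====
def Spec_build_q2r_map (ref_aln : String) (qry_aln : String) (out : List (Option Int) × Int) : Prop := out = build_q2r_map_alt ref_aln qry_aln
instance (ref_aln : String) (qry_aln : String) (out : List (Option Int) × Int) : Decidable (Spec_build_q2r_map ref_aln qry_aln out) := by unfold Spec_build_q2r_map; infer_instance

-- ===== CLAIM (what is proved, stated in full; the proofs are below) =====
def Claim_equal_build_q2r_map : Prop := ∀ (ref_aln : String) (qry_aln : String), Dom_build_q2r_map ref_aln qry_aln → Spec_build_q2r_map ref_aln qry_aln (build_q2r_map ref_aln qry_aln)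

-- ===== LEMMAS AND PROOFS =====

-- the table fold only appends: starting tab factors out
theorem foldT_append (zs : List (Char × Char)) : ∀ (tab : List Int) (r : Int),
    zs.foldl pvStepT (tab, r)
      = (tab ++ (zs.foldl pvStepT ([], r)).1, (zs.foldl pvStepT ([], r)).2) := by
  induction zs with
  | nil => intro tab r; simp
  | cons c zs ih =>
    intro tab r
    simp only [List.foldl_cons, pvStepT]
    rw [ih (tab ++ [r]), ih ([] ++ [r])]
    simp

-- A's loop equals B's two passes, for any starting accumulators
theorem main_lemma (zs : List (Char × Char)) : ∀ (acc : List (Option Int)) (q r : Int),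
    ((zs.foldl pvStepA (acc, q, r)).1, (zs.foldl pvStepA (acc, q, r)).2.2)
      = (acc ++ (zs.zip (zs.foldl pvStepT ([], r)).1).filterMap pvSel,
         (zs.foldl pvStepT ([], r)).2) := by
  induction zs with
  | nil => intro acc q r; simp
  | cons c zs ih =>
    intro acc q r
    by_cases hq : c.2 = '-' <;> by_cases hr : c.1 = '-' <;>
      simp only [List.foldl_cons, pvStepA, pvStepT, pvSel, hq, hr, ne_eq,
        not_true_eq_false, not_false_eq_true, if_true, if_false,
        List.nil_append] <;>
      rw [ih] <;> simp [foldT_append zs [r], pvSel, hq, hr]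

-- ===== VERDICT (by name: the statement is the Claim_ definition above) =====
theorem build_q2r_map_spec : Claim_equal_build_q2r_map := by
  intro ref qry _
  unfold Spec_build_q2r_map build_q2r_map build_q2r_map_alt
  have h := main_lemma (ref.toList.zip qry.toList) [] 0 0
  simp only [List.nil_append] at h
  exact Prod.ext (congrArg Prod.fst h) (congrArg Prod.snd h)
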